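-- pv_equiv track=rewrite | github.com/llankar/GMCampaignDesigner | modules/helpers/list_utils.py | dedupe_preserve_case
-- ===== SOURCE A (Python) =====
-- from typing import Dict, Iterable, List, Mapping, Sequence, Tuple, TypeVar
--
-- T = TypeVar("T")
--
-- def dedupe_preserve_case(values: Iterable[T]) -> Tuple[List[T], Dict[T, List[T]]]:
--     """Return the values with case-folded duplicates removed.
--
--     The first encountered casing of each distinct string is preserved in the
--     output list.  Any subsequent values that match when compared using
--     :meth:`str.casefold` are collected and returned so callers can notify users
--     about collapsed duplicates.
--     """
--
--     result: List[T] = []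
--     seen: Dict[str, T] = {}
--     duplicates: Dict[T, List[T]] = {}
--
--     for value in values:
--         if isinstance(value, str):
--             key = value.casefold()
--         else:
--             key = str(value).casefold()
--
--         if key not in seen:
--             seen[key] = value
--             result.append(value)
--             continue
--
--         canonical = seen[key]
--         duplicates.setdefault(canonical, []).append(value)
--
--     return result, duplicates
-- ===== SOURCE B (Python) =====
-- def dedupe_preserve_case(values):
--     """Two-pass group-by: first pass records the first occurrence (index, value)
--     per case-folded key; result and duplicates are derived from that table."""
--     vals = list(values)
--
--     def fold(v):
--         return v.casefold() if isinstance(v, str) else str(v).casefold()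
--
--     first = {}
--     for i, v in enumerate(vals):
--         k = fold(v)
--         if k not in first:
--             first[k] = (i, v)
--
--     result = [v for (_, v) in first.values()]
--
--     duplicates = {}
--     for i, v in enumerate(vals):
--         fi, fv = first[fold(v)]
--         if i != fi:
--             duplicates.setdefault(fv, []).append(v)
--
--     return result, duplicates
-- ===== Notes on version B (the rewrite author's own statement) =====
-- stated objective: alternative
-- what changed: Replaces A's single interleaved pass (seen/result/duplicates updated together) by a two-pass group-by: pass one builds a first-occurrence table keyed by casefolded value, result is read off its values, and a second pass over the input classifies each element against that table to build duplicates.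
import Mathlib
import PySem

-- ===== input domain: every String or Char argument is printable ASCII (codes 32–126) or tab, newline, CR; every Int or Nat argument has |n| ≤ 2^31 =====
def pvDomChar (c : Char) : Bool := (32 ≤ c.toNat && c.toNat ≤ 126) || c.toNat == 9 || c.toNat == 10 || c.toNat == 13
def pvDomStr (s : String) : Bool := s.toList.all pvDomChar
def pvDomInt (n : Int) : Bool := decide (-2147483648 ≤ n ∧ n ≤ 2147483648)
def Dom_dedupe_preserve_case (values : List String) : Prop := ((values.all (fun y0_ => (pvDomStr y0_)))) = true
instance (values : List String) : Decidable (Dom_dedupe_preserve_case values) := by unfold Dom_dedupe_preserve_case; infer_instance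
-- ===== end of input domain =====

-- B replaces A's single interleaved pass by a two-pass group-by over a first-occurrence table (alternative decomposition, same cost).
-- str.casefold is ported as PySem.Str.lower, exact on the ASCII domain Dom_.

-- ===== PORT A =====
-- loop body of A: one value updates (result, seen, duplicates)
def pvStepA (st : List String × PySem.Dict String String × PySem.Dict String (List String))
    (value : String) :
    List String × PySem.Dict String String × PySem.Dict String (List String) :=
  let key := PySem.Str.lower value
  match st.2.1.get? key with
  | none => (st.1 ++ [value], st.2.1.insert key value, st.2.2)
  | some canonical => (st.1, st.2.1, st.2.2.modify canonical [] (· ++ [value]))  -- setdefault(...,[]).append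

def dedupe_preserve_case (values : List String) : List String × (List (String × List String)) :=
  let st := values.foldl pvStepA ([], PySem.Dict.empty, PySem.Dict.empty)
  (st.1, st.2.2.items)

-- ===== PORT B =====
-- pass 1 body: record the first (index, value) per casefolded key
def pvFirstStep (d : PySem.Dict String (Int × String)) (p : Int × String) :
    PySem.Dict String (Int × String) :=
  let k := PySem.Str.lower p.2
  if d.contains k then d else d.insert k p

-- pass 2 body: every non-first occurrence goes under its group's first value
def pvDupStep (first : PySem.Dict String (Int × String)) (du : PySem.Dict String (List String))
    (p : Int × String) : PySem.Dict String (List String) :=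
  match first.get? (PySem.Str.lower p.2) with
  | some fp => if p.1 ≠ fp.1 then du.modify fp.2 [] (· ++ [p.2]) else du
  | none => du  -- unreachable: every element's key is in `first`

def dedupe_preserve_case_alt (values : List String) : List String × (List (String × List String)) :=
  let first := (PySem.List.enumerate values).foldl pvFirstStep PySem.Dict.empty
  let result := first.values.map (·.2)
  let duplicates := (PySem.List.enumerate values).foldl (pvDupStep first) PySem.Dict.empty
  (result, duplicates.items)

-- ===== PRECONDITION & SPEC =====
def Spec_dedupe_preserve_case (values : List String) (out : List String × (List (String × List String))) : Prop := out = dedupe_preserve_case_alt values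
instance (values : List String) (out : List String × (List (String × List String))) : Decidable (Spec_dedupe_preserve_case values out) := by unfold Spec_dedupe_preserve_case; infer_instance

-- ===== CLAIM (what is proved, stated in full; the proofs are below) =====
def Claim_equal_dedupe_preserve_case : Prop := ∀ (values : List String), Dom_dedupe_preserve_case values → Spec_dedupe_preserve_case values (dedupe_preserve_case values)

-- ===== LEMMAS AND PROOFS =====

-- the invariant tying A's one-pass state to B's two-pass data, for any prefix l
def pvInv (l : List String) : Prop :=
  let st := l.foldl pvStepA ([], PySem.Dict.empty, PySem.Dict.empty)
  let F := (PySem.List.enumerate l).foldl pvFirstStep PySem.Dict.empty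
  st.1 = F.values.map (·.2)
  ∧ (∀ k, st.2.1.get? k = (F.get? k).map (·.2))
  ∧ st.2.2 = (PySem.List.enumerate l).foldl (pvDupStep F) PySem.Dict.empty
  ∧ (∀ k p, F.get? k = some p → 0 ≤ p.1 ∧ p.1 < (l.length : Int))
  ∧ (∀ w ∈ l, F.contains (PySem.Str.lower w) = true)

theorem pvInv_all (l : List String) : pvInv l := by
  induction l using List.reverseRecOn with
  | nil =>
      simp only [pvInv]
      simp [PySem.List.enumerate, PySem.Dict.values, PySem.Dict.empty, PySem.Dict.get?]
  | append_singleton l v ih =>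
      simp only [pvInv] at ih ⊢
      obtain ⟨h1, h2, h3, h4, h5⟩ := ih
      rw [List.foldl_append, PySem.List.enumerate_append]
      simp only [List.foldl_append, zero_add]
      set st := l.foldl pvStepA ([], PySem.Dict.empty, PySem.Dict.empty) with hst
      set E := PySem.List.enumerate l with hE
      set F := E.foldl pvFirstStep PySem.Dict.empty with hF
      simp only [PySem.List.enumerate_cons, PySem.List.enumerate_nil, List.foldl_cons, List.foldl_nil]
      by_cases hc : F.contains (PySem.Str.lower v) = true
      · -- duplicate key: F unchanged
        have hFs : pvFirstStep F ((l.length : Int), v) = F := by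
          simp [pvFirstStep, hc]
        obtain ⟨fp, hfp⟩ : ∃ fp, F.get? (PySem.Str.lower v) = some fp := by
          have := PySem.Dict.contains_eq_isSome_get? F (PySem.Str.lower v)
          rw [hc] at this
          exact Option.isSome_iff_exists.mp this.symm
        have hA : st.2.1.get? (PySem.Str.lower v) = some fp.2 := by
          rw [h2, hfp]; rfl
        have hbound := h4 _ _ hfp
        rw [hFs]
        have hstep : pvStepA st v = (st.1, st.2.1, st.2.2.modify fp.2 [] (· ++ [v])) := by
          simp [pvStepA, hA]
        rw [hstep]
        refine ⟨h1, h2, ?_, ?_, ?_⟩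
        · rw [h3]
          simp only [pvDupStep, hfp]
          have hne : ((l.length : Int) ≠ fp.1) := by omega
          simp [hne]
        · intro k p hp
          have := h4 k p hp
          simp only [List.length_append, List.length_cons, List.length_nil]
          push_cast
          omega
        · intro w hw
          rcases List.mem_append.mp hw with h | h
          · exact h5 w h
          · simp only [List.mem_singleton] at h
            subst h; exact hc
      · -- fresh key
        have hcf : F.contains (PySem.Str.lower v) = false := by
          simpa using hc
        have hFs : pvFirstStep F ((l.length : Int), v) = F.insert (PySem.Str.lower v) ((l.length : Int), v) := by
          simp [pvFirstStep, hcf]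
        have hn : F.get? (PySem.Str.lower v) = none := by
          cases hq : F.get? (PySem.Str.lower v) with
          | none => rfl
          | some p => rw [PySem.Dict.contains_eq_isSome_get?, hq] at hcf; simp at hcf
        have hA : st.2.1.get? (PySem.Str.lower v) = none := by
          rw [h2, hn]; rfl
        have hstep : pvStepA st v = (st.1 ++ [v], st.2.1.insert (PySem.Str.lower v) v, st.2.2) := by
          simp [pvStepA, hA]
        rw [hstep, hFs]
        have hmemE : ∀ p ∈ E, PySem.Str.lower p.2 ≠ PySem.Str.lower v := by
          intro p hp heq
          have hp2 : p.2 ∈ l := by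
            rw [hE] at hp
            rcases (PySem.List.mem_enumerate_iff _ _ _).mp hp with ⟨k, hk, rfl⟩
            exact List.getElem_mem hk
          have := h5 _ hp2
          rw [heq] at this
          rw [this] at hcf
          exact Bool.true_eq_false.mp hcf
        refine ⟨?_, ?_, ?_, ?_, ?_⟩
        · -- result
          have : (F.insert (PySem.Str.lower v) ((l.length : Int), v)).items = F.items ++ [(PySem.Str.lower v, ((l.length : Int), v))] :=
            PySem.Dict.items_insert_of_not_contains F _ hcf
          simp only [PySem.Dict.values, this, List.map_append, h1]
          simp
        · -- seen/first get? correspondence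
          intro k
          rw [PySem.Dict.get?_insert, PySem.Dict.get?_insert]
          by_cases hk : k = PySem.Str.lower v
          · simp [hk]
          · simp only [hk, if_false]
            exact h2 k
        · -- duplicates
          have hcongr : E.foldl (pvDupStep (F.insert (PySem.Str.lower v) ((l.length : Int), v))) PySem.Dict.empty
              = E.foldl (pvDupStep F) PySem.Dict.empty := by
            apply PySem.List.foldl_congr_mem
            intro du p hp
            simp only [pvDupStep]
            rw [PySem.Dict.get?_insert_of_ne _ _ (hmemE p hp)]
          rw [hcongr, ← h3]
          simp [pvDupStep, PySem.Dict.get?_insert_self]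
        · -- bounds
          intro k p hp
          rw [PySem.Dict.get?_insert] at hp
          simp only [List.length_append, List.length_cons, List.length_nil]
          push_cast
          by_cases hk : k = PySem.Str.lower v
          · rw [if_pos hk] at hp
            cases hp
            simp
          · rw [if_neg hk] at hp
            have := h4 k p hp
            omega
        · -- membership
          intro w hw
          rcases List.mem_append.mp hw with h | h
          · rw [PySem.Dict.contains_insert]
            rw [h5 w h]
            simp
          · simp only [List.mem_singleton] at h
            subst h
            exact PySem.Dict.contains_insert_self _ _ _

-- ===== VERDICT (by name: the statement is the Claim_ definition above) =====
theorem dedupe_preserve_case_spec : Claim_equal_dedupe_preserve_case := by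
  intro values _
  unfold Spec_dedupe_preserve_case
  obtain ⟨h1, _, h3, _, _⟩ := pvInv_all values
  simp only [dedupe_preserve_case, dedupe_preserve_case_alt]
  rw [h1, h3]
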